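-- pv_equiv track=rewrite | github.com/tynrol/Tests | tasks/2025.py | f
-- ===== SOURCE A (Python) =====
-- def f(n,k):
--     inT=n//k
--     overT=n%k
--     sum=0
--     for i in range(overT):
--         n-=inT+1
--         sum+=n*(inT+1)
--     for i in range(k-overT):
--         n-=inT
--         sum+=n*inT
--     return sum
-- ===== SOURCE B (Python) =====
-- def f(n, k):
--     # Closed form: both loops are arithmetic series, so the sum is computed in O(1).
--     q = n // k
--     r = n % k
--     a = r if r > 0 else 0          # iterations of the first loop
--     b = k - r if k - r > 0 else 0  # iterations of the second loop
--     c = q + 1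
--     big = c * (a * n - c * (a * (a + 1) // 2))
--     m = n - a * c
--     small = q * (b * m - q * (b * (b + 1) // 2))
--     return big + small
-- ===== Notes on version B (the rewrite author's own statement) =====
-- stated objective: faster
-- what changed: Replaces the two O(k) accumulation loops by closed-form arithmetic-series formulas for each chunk group, computing the sum in O(1).
import Mathlib
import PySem

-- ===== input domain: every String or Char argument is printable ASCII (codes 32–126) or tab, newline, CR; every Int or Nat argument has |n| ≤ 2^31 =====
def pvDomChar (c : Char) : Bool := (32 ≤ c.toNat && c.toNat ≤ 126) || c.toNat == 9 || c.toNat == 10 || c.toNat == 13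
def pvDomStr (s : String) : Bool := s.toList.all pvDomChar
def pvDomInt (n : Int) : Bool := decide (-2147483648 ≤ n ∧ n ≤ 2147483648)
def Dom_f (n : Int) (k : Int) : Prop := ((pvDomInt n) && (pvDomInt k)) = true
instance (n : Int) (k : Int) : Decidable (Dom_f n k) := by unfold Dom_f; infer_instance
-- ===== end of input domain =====

-- B replaces A's two accumulation loops by closed-form arithmetic-series formulas.

-- ===== PORT A =====
def f (n : Int) (k : Int) : Int :=
  let inT := PySem.Int.floordiv n k
  let overT := PySem.Int.mod n k
  let p1 := (PySem.List.pyRange 0 overT 1).foldl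
      (fun (p : Int × Int) _ => (p.1 - (inT + 1), p.2 + (p.1 - (inT + 1)) * (inT + 1))) (n, 0)
  let p2 := (PySem.List.pyRange 0 (k - overT) 1).foldl
      (fun (p : Int × Int) _ => (p.1 - inT, p.2 + (p.1 - inT) * inT)) p1
  p2.2

-- ===== PORT B =====
def f_alt (n : Int) (k : Int) : Int :=
  let q := PySem.Int.floordiv n k
  let r := PySem.Int.mod n k
  let a := if r > 0 then r else 0
  let b := if k - r > 0 then k - r else 0
  let c := q + 1
  let big := c * (a * n - c * PySem.Int.floordiv (a * (a + 1)) 2)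
  let m := n - a * c
  let small := q * (b * m - q * PySem.Int.floordiv (b * (b + 1)) 2)
  big + small

-- ===== PRECONDITION & SPEC =====
-- Python A raises ZeroDivisionError iff k = 0; that is all Pre_ excludes.
def Pre_f (n : Int) (k : Int) : Prop := k ≠ 0
instance (n : Int) (k : Int) : Decidable (Pre_f n k) := by unfold Pre_f; infer_instance
def pvWitness_f : Int × Int := (17, 5)

def Spec_f (n : Int) (k : Int) (out : Int) : Prop := out = f_alt n k
instance (n : Int) (k : Int) (out : Int) : Decidable (Spec_f n k out) := by unfold Spec_f; infer_instance

-- ===== CLAIM (what is proved, stated in full; the proofs are below) =====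
def Claim_equal_f : Prop := ∀ (n : Int) (k : Int), Dom_f n k → Pre_f n k → Spec_f n k (f n k)

-- ===== LEMMAS AND PROOFS =====

lemma gauss_succ (m : Nat) : (m + 1) * (m + 2) / 2 = m * (m + 1) / 2 + (m + 1) := by
  have h : (m + 1) * (m + 2) = m * (m + 1) + 2 * (m + 1) := by ring
  have h2 : 2 ∣ m * (m + 1) := (Nat.even_mul_succ_self m).two_dvd
  omega

-- A's loop body, run over any index list, as a closed form in the list's length
lemma loop_closed (c : Int) : ∀ (l : List Int) (n s : Int),
    l.foldl (fun (p : Int × Int) _ => (p.1 - c, p.2 + (p.1 - c) * c)) (n, s)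
      = (n - l.length * c,
         s + c * (l.length * n) - c * c * ((l.length * (l.length + 1) / 2 : Nat) : Int)) := by
  intro l
  induction l with
  | nil => intro n s; simp
  | cons x xs ih =>
      intro n s
      simp only [List.foldl_cons, List.length_cons, ih, Prod.mk.injEq]
      refine ⟨by push_cast; ring, ?_⟩
      have h := gauss_succ xs.length
      push_cast [h]
      ring

lemma floordiv_gauss (x : Int) (hx : 0 ≤ x) :
    PySem.Int.floordiv (x * (x + 1)) 2 = ((x.toNat * (x.toNat + 1) / 2 : Nat) : Int) := by
  rw [PySem.Int.floordiv_eq_ediv_of_pos (show (0:Int) < 2 by norm_num)]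
  push_cast [Int.toNat_of_nonneg hx]
  rfl

-- ===== VERDICT (by name: the statement is the Claim_ definition above) =====
theorem f_spec : Claim_equal_f := by
  intro n k _ hk
  unfold Spec_f
  simp only [f, f_alt]
  rcases lt_or_gt_of_ne hk with hneg | hpos
  · -- k < 0 : both ranges are empty in A; both iteration counts clamp to 0 in B
    have hb : PySem.Int.mod (-n) (-k) = (-n) % (-k) :=
      PySem.Int.mod_eq_emod_of_pos (show (0:Int) < -k by omega)
    have hnn := Int.emod_nonneg (-n) (show (-k : Int) ≠ 0 by omega)
    have hlt := Int.emod_lt_of_pos (-n) (show (0:Int) < -k by omega)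
    have hneq := PySem.Int.mod_neg_neg n k
    have hrle : PySem.Int.mod n k ≤ 0 := by omega
    have hrk : k < PySem.Int.mod n k := by omega
    rw [PySem.List.pyRange_one_eq_nil (show PySem.Int.mod n k ≤ 0 from hrle),
        PySem.List.pyRange_one_eq_nil (show k - PySem.Int.mod n k ≤ 0 by omega)]
    simp only [List.foldl_nil]
    rw [if_neg (by omega), if_neg (by omega)]
    simp [PySem.Int.floordiv, Int.zero_fdiv]
  · -- k > 0 : 0 ≤ mod n k < k
    have hb : PySem.Int.mod n k = n % k :=
      PySem.Int.mod_eq_emod_of_pos hpos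
    have hnn := Int.emod_nonneg n (show (k : Int) ≠ 0 by omega)
    have hlt := Int.emod_lt_of_pos n hpos
    have hr0 : 0 ≤ PySem.Int.mod n k := by omega
    have hrk : PySem.Int.mod n k < k := by omega
    rw [loop_closed, loop_closed]
    simp only [PySem.List.length_pyRange_one]
    have ha : (if PySem.Int.mod n k > 0 then PySem.Int.mod n k else 0) = PySem.Int.mod n k := by
      split_ifs with h
      · rfl
      · omega
    rw [ha, if_pos (show k - PySem.Int.mod n k > 0 by omega)]
    rw [floordiv_gauss _ hr0, floordiv_gauss _ (show (0:Int) ≤ k - PySem.Int.mod n k by omega)]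
    push_cast [Int.toNat_of_nonneg hr0,
      Int.toNat_of_nonneg (show (0:Int) ≤ PySem.Int.mod n k - 0 by omega),
      Int.toNat_of_nonneg (show (0:Int) ≤ k - PySem.Int.mod n k - 0 by omega),
      Int.toNat_of_nonneg (show (0:Int) ≤ k - PySem.Int.mod n k by omega)]
    ring
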